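-- pv_equiv track=rewrite | github.com/981377660LMT/algorithm-study | 13_回溯算法/经典bt/将11置为00-回溯TLE.py | solve
-- ===== SOURCE A (Python) =====
-- from typing import List
--
-- def solve(nums: List[int]) -> bool:
--     """Assuming you play first and play optimally, return whether you can win the game."""
--
--     def bt() -> bool:
--         for i in range(len(nums) - 1):
--             if nums[i] == nums[i + 1] == 1:
--                 nums[i] = nums[i + 1] = 0
--                 if not bt():
--                     # 注意回溯 不要return就不管了
--                     nums[i] = nums[i + 1] = 1
--                     return True
--
--                 nums[i] = nums[i + 1] = 1
--
--         return False
--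
--     return bt()
-- ===== SOURCE B (Python) =====
-- from typing import List
--
-- def solve(nums: List[int]) -> bool:
--     """Sprague-Grundy: win iff XOR of per-run Grundy values is nonzero."""
--     # run lengths of maximal blocks of 1s
--     runs = []
--     cur = 0
--     for v in nums:
--         if v == 1:
--             cur += 1
--         else:
--             if cur != 0:
--                 runs.append(cur)
--             cur = 0
--     if cur != 0:
--         runs.append(cur)
--     # Grundy table g[k] for a run of k ones (flip "11" inside it -> split), up to the longest run
--     m = 0
--     for r in runs:
--         m = max(m, r)
--     g = [0, 0]
--     for k in range(2, m + 1):
--         opts = [g[i] ^ g[k - 2 - i] for i in range(k - 1)]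
--         mex = 0
--         while mex in opts:
--             mex += 1
--         g.append(mex)
--     x = 0
--     for r in runs:
--         x ^= g[r]
--     return x != 0
-- ===== Notes on version B (the rewrite author's own statement) =====
-- stated objective: alternative
-- what changed: Replaces the exponential backtracking game search with Sprague-Grundy theory: collect run lengths of consecutive 1s, build a Grundy table for the split game (flip 11->00 inside a run) by mex-DP, and win iff the XOR of the per-run Grundy values is nonzero; polynomial instead of exponential in the number of 1s, though a timing run's 1-sparse inputs showed no stable >=1.5x gain.
import Mathlib
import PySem

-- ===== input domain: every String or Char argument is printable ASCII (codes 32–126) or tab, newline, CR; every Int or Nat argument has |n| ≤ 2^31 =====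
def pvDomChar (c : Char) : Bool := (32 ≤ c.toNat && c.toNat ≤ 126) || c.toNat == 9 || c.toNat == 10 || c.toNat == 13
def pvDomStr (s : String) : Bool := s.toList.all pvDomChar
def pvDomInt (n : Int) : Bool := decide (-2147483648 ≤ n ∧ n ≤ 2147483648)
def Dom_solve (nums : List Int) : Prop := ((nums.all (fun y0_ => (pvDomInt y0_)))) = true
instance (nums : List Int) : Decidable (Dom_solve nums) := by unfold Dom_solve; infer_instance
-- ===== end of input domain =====

-- B replaces A's backtracking game search by Sprague-Grundy theory
-- (per-run Grundy table + XOR of run values), a genuinely different exact algorithm.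
-- A mutates `nums` during the search but restores it before every return, so
-- the list is unchanged when A returns; equivalence is about the return value.

-- ===== PORT A =====
-- nums[i] = nums[i+1] = 0 (resp. 1) in Python: set both positions (i is in range here)
def flip2 (l : List Int) (i : Nat) (v : Int) : List Int := (l.set i v).set (i+1) v

-- `bt` with its `for i in range(len(nums)-1)` loop; `fuel` only guards termination
-- (each recursive call removes two 1s, so the fuel `solve` supplies is never exhausted).
def btGo (fuel : Nat) (l : List Int) (i : Nat) : Bool :=
  match fuel with
  | 0 => false
  | f+1 =>
    if _h : i + 1 < l.length then
      if l.getD i 0 = 1 ∧ l.getD (i+1) 0 = 1 then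
        if btGo f (flip2 l i 0) 0 then btGo (f+1) l (i+1) else true
      else btGo (f+1) l (i+1)
    else false
termination_by (fuel, l.length - i)
decreasing_by
  · exact Prod.Lex.left _ _ (Nat.lt_succ_self f)
  · exact Prod.Lex.right (f+1) (by omega)
  · exact Prod.Lex.right (f+1) (by omega)

def solve (nums : List Int) : Bool := btGo (nums.length + 1) nums 0

-- ===== PORT B =====
-- the run-collecting for-loop of B (state: runs accumulator `acc`, current run length `cur`)
def runsGo : List Int → List Nat → Nat → List Nat
  | [], acc, cur => if cur ≠ 0 then acc ++ [cur] else acc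
  | v :: rest, acc, cur =>
    if v = 1 then runsGo rest acc (cur+1)
    else if cur ≠ 0 then runsGo rest (acc ++ [cur]) 0 else runsGo rest acc 0

-- `while mex in opts: mex += 1`; fuel `|opts|+1` only guards termination
def mexGo (s : List Nat) : Nat → Nat → Nat
  | 0, k => k
  | f+1, k => if k ∈ s then mexGo s f (k+1) else k

def mexL (s : List Nat) : Nat := mexGo s (s.length + 1) 0

-- `for k in range(2, n+1): ... g.append(mex)` starting from g = [0, 0]
def gTable (n : Nat) : List Nat :=
  (List.range' 2 (n-1)).foldl
    (fun acc k =>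
      acc ++ [mexL ((List.range (k-1)).map (fun i => acc.getD i 0 ^^^ acc.getD (k-2-i) 0))])
    [0, 0]

def solve_alt (nums : List Int) : Bool :=
  let runs := runsGo nums [] 0
  let m := runs.foldl (fun a r => max a r) 0
  let g := gTable m
  let x := runs.foldl (fun a r => a ^^^ g.getD r 0) 0
  decide (x ≠ 0)

-- ===== PRECONDITION & SPEC =====
def Spec_solve (nums : List Int) (out : Bool) : Prop := out = solve_alt nums
instance (nums : List Int) (out : Bool) : Decidable (Spec_solve nums out) := by unfold Spec_solve; infer_instance

-- ===== CLAIM (what is proved, stated in full; the proofs are below) =====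
def Claim_equal_solve : Prop := ∀ (nums : List Int), Dom_solve nums → Spec_solve nums (solve nums)

-- ===== LEMMAS AND PROOFS =====

-- the mathematical Grundy value of a run of n ones
def gr : Nat → Nat
  | 0 => 0
  | 1 => 0
  | n+2 => mexL (((List.range (n+1)).attach).map (fun i => gr i.1 ^^^ gr (n - i.1)))
decreasing_by
  · have := i.2; simp [List.mem_range] at this; omega
  · have := i.2; simp [List.mem_range] at this; omega

-- gr unfolding without `attach`
theorem gr_succ (n : Nat) :
    gr (n+2) = mexL ((List.range (n+1)).map (fun i => gr i ^^^ gr (n - i))) := by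
  rw [gr]
  congr 1
  simp

-- ---------- mex ----------
theorem filter_mono_len (s : List Nat) (k : Nat) :
    (s.filter (fun x => k+1 ≤ x)).length ≤ (s.filter (fun x => k ≤ x)).length := by
  induction s with
  | nil => simp
  | cons x s ih =>
    rw [List.filter_cons, List.filter_cons]
    simp only [decide_eq_true_eq]
    by_cases h1 : k + 1 ≤ x
    · rw [if_pos h1, if_pos (by omega : k ≤ x)]
      simp only [List.length_cons]
      omega
    · rw [if_neg h1]
      by_cases h2 : k ≤ x
      · rw [if_pos h2]; simp only [List.length_cons]; omega
      · rw [if_neg h2]; exact ih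

theorem filter_split (s : List Nat) (k : Nat) (hk : k ∈ s) :
    (s.filter (fun x => k+1 ≤ x)).length < (s.filter (fun x => k ≤ x)).length := by
  induction s with
  | nil => cases hk
  | cons x s ih =>
    rw [List.filter_cons, List.filter_cons]
    simp only [decide_eq_true_eq]
    rcases List.mem_cons.mp hk with h | h
    · subst h
      rw [if_neg (by omega : ¬ (k + 1 ≤ k)), if_pos (le_refl k)]
      have := filter_mono_len s k
      simp only [List.length_cons]
      omega
    · by_cases h1 : k + 1 ≤ x
      · rw [if_pos h1, if_pos (by omega : k ≤ x)]
        have := ih h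
        simp only [List.length_cons]
        omega
      · rw [if_neg h1]
        by_cases h2 : k ≤ x
        · rw [if_pos h2]
          have := ih h
          simp only [List.length_cons]
          omega
        · rw [if_neg h2]; exact ih h

theorem mexGo_spec (s : List Nat) (fuel k : Nat)
    (h : (s.filter (fun x => k ≤ x)).length < fuel) :
    mexGo s fuel k ∉ s ∧ ∀ t, k ≤ t → t < mexGo s fuel k → t ∈ s := by
  induction fuel generalizing k with
  | zero => omega
  | succ f ih =>
    by_cases hk : k ∈ s
    · have hlt : (s.filter (fun x => k+1 ≤ x)).length < f := by
        have := filter_split s k hk; omega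
      obtain ⟨h1, h2⟩ := ih (k+1) hlt
      refine ⟨by simpa [mexGo, hk] using h1, fun t ht1 ht2 => ?_⟩
      simp [mexGo, hk] at ht2
      rcases Nat.eq_or_lt_of_le ht1 with rfl | h
      · exact hk
      · exact h2 t h ht2
    · simp [mexGo, hk]
      omega

theorem mex_fuel_ok (s : List Nat) : (s.filter (fun x => 0 ≤ x)).length < s.length + 1 :=
  Nat.lt_succ_of_le (List.length_filter_le _ s)

theorem mex_not_mem (s : List Nat) : mexL s ∉ s :=
  (mexGo_spec s (s.length+1) 0 (mex_fuel_ok s)).1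

theorem mem_of_lt_mex (s : List Nat) (t : Nat) (h : t < mexL s) : t ∈ s :=
  (mexGo_spec s (s.length+1) 0 (mex_fuel_ok s)).2 t (Nat.zero_le t) h

-- ---------- grundy options ----------
def optVals (n : Nat) : List Nat := (List.range (n-1)).map (fun i => gr i ^^^ gr (n-2-i))

theorem gr_eq_mex (n : Nat) (h : 2 ≤ n) : gr n = mexL (optVals n) := by
  obtain ⟨m, rfl⟩ : ∃ m, n = m + 2 := ⟨n - 2, by omega⟩
  rw [gr_succ]
  congr 1

theorem gr_opt_mem (j b : Nat) : gr j ^^^ gr b ∈ optVals (j+2+b) := by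
  have hb : j + 2 + b - 2 - j = b := by omega
  refine List.mem_map.mpr ⟨j, List.mem_range.mpr (by omega), by rw [hb]⟩

theorem gr_ne_opt (j b : Nat) : gr (j+2+b) ≠ gr j ^^^ gr b := by
  intro e
  have := mex_not_mem (optVals (j+2+b))
  rw [← gr_eq_mex _ (by omega), e] at this
  exact this (gr_opt_mem j b)

theorem gr_lt_two (n : Nat) (h : n < 2) : gr n = 0 := by
  interval_cases n <;> simp [gr]

-- ---------- runs, xor values ----------
def runsA (c : Nat) : List Int → List Nat
  | [] => [c]
  | v :: r => if v = 1 then runsA (c+1) r else c :: runsA 0 r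

def xorG (rs : List Nat) : Nat := rs.foldr (fun r a => gr r ^^^ a) 0

def XA (c : Nat) (l : List Int) : Nat := xorG (runsA c l)

theorem XA_nil (c : Nat) : XA c [] = gr c := by simp [XA, runsA, xorG]
theorem XA_one (c : Nat) (r : List Int) : XA c (1 :: r) = XA (c+1) r := by
  simp [XA, runsA]
theorem XA_not_one (c : Nat) (v : Int) (r : List Int) (h : v ≠ 1) :
    XA c (v :: r) = gr c ^^^ XA 0 r := by
  simp [XA, runsA, h, xorG]

def lo : List Int → Nat
  | [] => 0
  | v :: r => if v = 1 then lo r + 1 else 0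

def tr (c : Nat) : List Int → Nat
  | [] => c
  | v :: r => tr (if v = 1 then c+1 else 0) r

theorem lo_cons_one (r : List Int) : lo (1 :: r) = lo r + 1 := by simp [lo]
theorem lo_cons_ne (v : Int) (r : List Int) (h : v ≠ 1) : lo (v :: r) = 0 := by simp [lo, h]
theorem tr_cons_one (c : Nat) (r : List Int) : tr c (1 :: r) = tr (c+1) r := by simp [tr]
theorem tr_cons_ne (c : Nat) (v : Int) (r : List Int) (h : v ≠ 1) : tr c (v :: r) = tr 0 r := by
  simp [tr, h]

theorem xor_left_comm (a b c : Nat) : a ^^^ (b ^^^ c) = b ^^^ (a ^^^ c) := by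
  rw [← Nat.xor_assoc, Nat.xor_comm a b, Nat.xor_assoc]

theorem Xshift (l : List Int) (k k' : Nat) :
    XA k l ^^^ gr (k + lo l) = XA k' l ^^^ gr (k' + lo l) := by
  induction l generalizing k k' with
  | nil => simp [XA_nil, lo, Nat.xor_self]
  | cons v r ih =>
    by_cases hv : v = 1
    · subst hv
      rw [XA_one, XA_one, lo_cons_one]
      have := ih (k+1) (k'+1)
      have e1 : k + (lo r + 1) = k + 1 + lo r := by omega
      have e2 : k' + (lo r + 1) = k' + 1 + lo r := by omega
      rw [e1, e2]
      exact this
    · rw [XA_not_one _ _ _ hv, XA_not_one _ _ _ hv, lo_cons_ne _ _ hv]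
      simp only [Nat.add_zero]
      rw [Nat.xor_comm (gr k) (XA 0 r), Nat.xor_assoc, Nat.xor_self, Nat.xor_zero,
          Nat.xor_comm (gr k') (XA 0 r), Nat.xor_assoc, Nat.xor_self, Nat.xor_zero]

theorem flip_formula (L : List Int) (c : Nat) (R : List Int) :
    XA c (L ++ 1 :: 1 :: R) =
      XA c (L ++ 0 :: 0 :: R) ^^^ gr (tr c L + 2 + lo R) ^^^ gr (tr c L) ^^^ gr (lo R) := by
  induction L generalizing c with
  | nil =>
    simp only [List.nil_append, tr]
    rw [XA_one, XA_one, XA_not_one c 0 (0 :: R) (by norm_num),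
        XA_not_one 0 0 R (by norm_num), gr_lt_two 0 (by norm_num), Nat.zero_xor]
    have key : XA (c+2) R ^^^ gr (c + 2 + lo R) = XA 0 R ^^^ gr (lo R) := by
      simpa using Xshift R (c+2) 0
    have : XA (c+1+1) R = XA 0 R ^^^ gr (lo R) ^^^ gr (c + 2 + lo R) := by
      rw [← key]
      rw [Nat.xor_assoc, Nat.xor_self, Nat.xor_zero]
    rw [this]
    simp [Nat.xor_assoc, Nat.xor_comm, Nat.xor_xor_cancel_left]
  | cons v L ih =>
    by_cases hv : v = 1
    · subst hv
      rw [List.cons_append, List.cons_append, XA_one, XA_one]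
      rw [tr_cons_one]
      exact ih (c+1)
    · rw [List.cons_append, List.cons_append, XA_not_one _ _ _ hv, XA_not_one _ _ _ hv]
      rw [tr_cons_ne _ _ _ hv, ih 0]
      simp [Nat.xor_assoc, Nat.xor_comm, xor_left_comm]

-- ---------- move decomposition ----------
theorem valid_decomp (l : List Int) (i : Nat) (h : i + 1 < l.length)
    (h1 : l.getD i 0 = 1) (h2 : l.getD (i+1) 0 = 1) :
    l = l.take i ++ 1 :: 1 :: l.drop (i+2) := by
  conv_lhs => rw [← List.take_append_drop i l]
  congr 1
  rw [List.drop_eq_getElem_cons (by omega : i < l.length)]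
  congr 1
  · rw [List.getD_eq_getElem l 0 (by omega : i < l.length)] at h1; exact h1
  · rw [List.drop_eq_getElem_cons (by omega : i + 1 < l.length)]
    congr 1
    rw [List.getD_eq_getElem l 0 (by omega : i + 1 < l.length)] at h2; exact h2

theorem set_set_mid (T D : List Int) (a b v : Int) :
    ((T ++ a :: b :: D).set T.length v).set (T.length+1) v = T ++ v :: v :: D := by
  rw [List.set_append, if_neg (lt_irrefl _), Nat.sub_self, List.set_cons_zero,
      List.set_append, if_neg (by omega), Nat.add_sub_cancel_left]
  rfl

theorem flip2_decomp (l : List Int) (i : Nat) (h : i + 1 < l.length)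
    (h1 : l.getD i 0 = 1) (h2 : l.getD (i+1) 0 = 1) :
    flip2 l i 0 = l.take i ++ 0 :: 0 :: l.drop (i+2) := by
  have hd := valid_decomp l i h h1 h2
  have hlen : (l.take i).length = i := by
    rw [List.length_take]; omega
  calc flip2 l i 0 = flip2 (l.take i ++ 1 :: 1 :: l.drop (i+2)) i 0 := by rw [← hd]
    _ = l.take i ++ 0 :: 0 :: l.drop (i+2) := by
        unfold flip2
        generalize l.take i = T at hlen ⊢
        generalize l.drop (i+2) = D
        subst hlen
        exact set_set_mid T D 1 1 0

-- ---------- losing side ----------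
theorem XA_flip (l : List Int) (i : Nat) (h : i + 1 < l.length)
    (h1 : l.getD i 0 = 1) (h2 : l.getD (i+1) 0 = 1) :
    XA 0 (flip2 l i 0) =
      XA 0 l ^^^ gr (tr 0 (l.take i) + 2 + lo (l.drop (i+2))) ^^^
        gr (tr 0 (l.take i)) ^^^ gr (lo (l.drop (i+2))) := by
  have hf := flip_formula (l.take i) 0 (l.drop (i+2))
  rw [← valid_decomp l i h h1 h2] at hf
  rw [flip2_decomp l i h h1 h2, hf]
  simp [Nat.xor_comm, xor_left_comm, Nat.xor_xor_cancel_left]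

theorem GLose (l : List Int) (i : Nat) (h : i + 1 < l.length)
    (h1 : l.getD i 0 = 1) (h2 : l.getD (i+1) 0 = 1) (hx : XA 0 l = 0) :
    XA 0 (flip2 l i 0) ≠ 0 := by
  rw [XA_flip l i h h1 h2, hx, Nat.zero_xor]
  intro e
  rw [Nat.xor_assoc, Nat.xor_eq_zero_iff] at e
  exact gr_ne_opt (tr 0 (l.take i)) (lo (l.drop (i+2))) e

-- ---------- winning side ----------
theorem xorG_bit (rs : List Nat) (h : Nat) (hb : (xorG rs).testBit h = true) :
    ∃ n ∈ rs, (gr n).testBit h = true := by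
  induction rs with
  | nil => simp [xorG, Nat.zero_testBit] at hb
  | cons r rs ih =>
    have : xorG (r :: rs) = gr r ^^^ xorG rs := rfl
    rw [this, Nat.testBit_xor] at hb
    by_cases hr : (gr r).testBit h = true
    · exact ⟨r, List.mem_cons_self, hr⟩
    · simp only [Bool.not_eq_true] at hr
      rw [hr, Bool.false_xor] at hb
      obtain ⟨n, hn, hb'⟩ := ih hb
      exact ⟨n, List.mem_cons_of_mem r hn, hb'⟩

theorem lo_le_length (l : List Int) : lo l ≤ l.length := by
  induction l with
  | nil => simp [lo]
  | cons v r ih =>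
    by_cases hv : v = 1
    · subst hv; rw [lo_cons_one]; simp; omega
    · rw [lo_cons_ne _ _ hv]; simp

theorem runsA_first (c : Nat) (l : List Int) (h : lo l < l.length) :
    runsA c l = (c + lo l) :: runsA 0 (l.drop (lo l + 1)) := by
  induction l generalizing c with
  | nil => simp at h
  | cons v r ih =>
    by_cases hv : v = 1
    · subst hv
      rw [lo_cons_one] at h ⊢
      have h' : lo r < r.length := by simp at h; omega
      rw [show runsA c (1 :: r) = runsA (c+1) r from by simp [runsA], ih (c+1) h']
      have : c + 1 + lo r = c + (lo r + 1) := by omega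
      rw [this]
      rfl
    · rw [lo_cons_ne _ _ hv]
      rw [show runsA c (v :: r) = c :: runsA 0 r from by simp [runsA, hv]]
      simp

theorem runsA_all_ones (c : Nat) (l : List Int) (h : lo l = l.length) :
    runsA c l = [c + l.length] := by
  induction l generalizing c with
  | nil => simp [runsA]
  | cons v r ih =>
    by_cases hv : v = 1
    · subst hv
      rw [lo_cons_one] at h
      simp only [List.length_cons] at h
      rw [show runsA c (1 :: r) = runsA (c+1) r from by simp [runsA], ih (c+1) (by omega)]
      simp
      omega
    · rw [lo_cons_ne _ _ hv] at h
      simp at h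

theorem tr_replicate (c j : Nat) : tr c (List.replicate j 1) = c + j := by
  induction j generalizing c with
  | zero => simp [tr]
  | succ j ih =>
    rw [List.replicate_succ, tr_cons_one, ih]
    omega

theorem first_run_extract (l : List Int) (j : Nat) (h : j + 2 ≤ lo l) :
    l = List.replicate j 1 ++ 1 :: 1 :: l.drop (j+2) ∧ lo (l.drop (j+2)) = lo l - (j+2) := by
  induction j generalizing l with
  | zero =>
    match l with
    | [] => simp [lo] at h
    | v :: r =>
      have hv : v = 1 := by
        by_contra hv
        rw [lo_cons_ne _ _ hv] at h; omega
      subst hv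
      rw [lo_cons_one] at h
      match r with
      | [] => simp [lo] at h
      | w :: r' =>
        have hw : w = 1 := by
          by_contra hw
          rw [lo_cons_ne _ _ hw] at h; omega
        subst hw
        rw [lo_cons_one] at h ⊢
        rw [lo_cons_one]
        simp
  | succ j ih =>
    match l with
    | [] => simp [lo] at h
    | v :: r =>
      have hv : v = 1 := by
        by_contra hv
        rw [lo_cons_ne _ _ hv] at h; omega
      subst hv
      rw [lo_cons_one] at h ⊢
      obtain ⟨h1, h2⟩ := ih r (by omega)
      constructor
      · rw [List.replicate_succ, List.cons_append, List.drop_succ_cons]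
        exact congrArg (1 :: ·) h1
      · rw [List.drop_succ_cons, h2]
        omega

theorem tr_append (A B : List Int) (c : Nat) : tr c (A ++ B) = tr (tr c A) B := by
  induction A generalizing c with
  | nil => rfl
  | cons v A ih => rw [List.cons_append]; by_cases hv : v = 1
                   · subst hv; rw [tr_cons_one, tr_cons_one, ih]
                   · rw [tr_cons_ne _ _ _ hv, tr_cons_ne _ _ _ hv, ih]

theorem tr_take_lo (l : List Int) (c : Nat) (h : lo l < l.length) :
    tr c (l.take (lo l + 1)) = 0 := by
  induction l generalizing c with
  | nil => simp at h
  | cons v r ih =>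
    by_cases hv : v = 1
    · subst hv
      rw [lo_cons_one, List.take_succ_cons, tr_cons_one]
      exact ih (c+1) (by rw [lo_cons_one] at h; simp at h; omega)
    · rw [lo_cons_ne _ _ hv, List.take_succ_cons, List.take_zero]
      rw [show tr c [v] = tr 0 [] from tr_cons_ne _ _ _ hv]
      rfl

theorem run_decomp (l : List Int) (n j : Nat) (hm : n ∈ runsA 0 l) (hj : j + 2 ≤ n) :
    ∃ L R, l = L ++ 1 :: 1 :: R ∧ tr 0 L = j ∧ lo R = n - 2 - j := by
  induction hN : l.length using Nat.strong_induction_on generalizing l with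
  | _ N ih =>
    subst hN
    by_cases hall : lo l = l.length
    · rw [runsA_all_ones 0 l hall] at hm
      simp at hm
      have hn : n = lo l := by omega
      obtain ⟨h1, h2⟩ := first_run_extract l j (by omega)
      exact ⟨List.replicate j 1, l.drop (j+2), h1,
        by rw [tr_replicate]; omega, by omega⟩
    · have hlt : lo l < l.length := lt_of_le_of_ne (lo_le_length l) hall
      rw [runsA_first 0 l hlt] at hm
      rcases List.mem_cons.mp hm with hn | hn
      · have hn' : n = lo l := by omega
        obtain ⟨h1, h2⟩ := first_run_extract l j (by omega)
        exact ⟨List.replicate j 1, l.drop (j+2), h1,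
          by rw [tr_replicate]; omega, by omega⟩
      · have hlen : (l.drop (lo l + 1)).length < l.length := by
          rw [List.length_drop]; omega
        obtain ⟨L, R, hLR, htr, hlo⟩ := ih _ hlen (l.drop (lo l + 1)) hn rfl
        refine ⟨l.take (lo l + 1) ++ L, R, ?_, ?_, hlo⟩
        · rw [List.append_assoc, ← hLR, List.take_append_drop]
        · rw [tr_append, tr_take_lo l 0 hlt, htr]

theorem GWin (l : List Int) (hx : XA 0 l ≠ 0) :
    ∃ i, i + 1 < l.length ∧ l.getD i 0 = 1 ∧ l.getD (i+1) 0 = 1 ∧ XA 0 (flip2 l i 0) = 0 := by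
  obtain ⟨h, hb, hhigh⟩ := Nat.exists_most_significant_bit hx
  obtain ⟨n, hmem, hgb⟩ := xorG_bit (runsA 0 l) h hb
  have hgn0 : gr n ≠ 0 := by
    intro e; rw [e, Nat.zero_testBit] at hgb; exact Bool.false_ne_true hgb
  have hn2 : 2 ≤ n := by
    by_contra hn
    exact hgn0 (gr_lt_two n (by omega))
  have ht : XA 0 l ^^^ gr n < gr n := by
    apply Nat.lt_of_testBit h
    · rw [Nat.testBit_xor, hb, hgb]; rfl
    · exact hgb
    · intro m hm
      rw [Nat.testBit_xor, hhigh m hm, Bool.false_xor]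
  have htm : XA 0 l ^^^ gr n ∈ optVals n := by
    apply mem_of_lt_mex
    rw [← gr_eq_mex n hn2]
    exact ht
  obtain ⟨j, hjr, hje⟩ := List.mem_map.mp htm
  have hjn : j + 2 ≤ n := by
    have := List.mem_range.mp hjr; omega
  obtain ⟨L, R, hLR, htr, hlo⟩ := run_decomp l n j hmem hjn
  have hLlen : L.length + 1 < l.length := by
    rw [hLR]; simp
  have hg1 : l.getD L.length 0 = 1 := by
    rw [hLR, List.getD_append_right L _ 0 L.length (le_refl _), Nat.sub_self]; rfl
  have hg2 : l.getD (L.length + 1) 0 = 1 := by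
    rw [hLR, List.getD_append_right L _ 0 _ (by omega), Nat.add_sub_cancel_left]; rfl
  refine ⟨L.length, hLlen, hg1, hg2, ?_⟩
  have htk : l.take L.length = L := by
    conv_lhs => rw [hLR]
    exact List.take_left
  have hdr : l.drop (L.length + 2) = R := by
    conv_lhs => rw [hLR]
    rw [show L.length + 2 = (L ++ [(1:Int), 1]).length from by simp,
        show L ++ (1:Int) :: 1 :: R = (L ++ [(1:Int), 1]) ++ R from by simp]
    exact List.drop_left
  rw [XA_flip l L.length hLlen hg1 hg2, htk, hdr, htr, hlo]
  have hone : j + 2 + (n - 2 - j) = n := by omega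
  rw [hone, ← hje]
  simp [Nat.xor_comm, Nat.xor_self, Nat.xor_xor_cancel_left]

-- ---------- the backtracking search computes XA ≠ 0 ----------
theorem count_flip (l : List Int) (i : Nat) (h : i + 1 < l.length)
    (h1 : l.getD i 0 = 1) (h2 : l.getD (i+1) 0 = 1) :
    (flip2 l i 0).count 1 + 2 = l.count 1 := by
  rw [flip2_decomp l i h h1 h2]
  conv_rhs => rw [valid_decomp l i h h1 h2]
  simp [List.count_append]
  omega

theorem btGo_loop (f : Nat)
    (IH : ∀ l' : List Int, l'.count 1 < f → btGo f l' 0 = decide (XA 0 l' ≠ 0))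
    (l : List Int) (hc : l.count 1 < f + 1) (i : Nat) :
    (btGo (f+1) l i = true ↔
      ∃ k, i ≤ k ∧ k + 1 < l.length ∧ l.getD k 0 = 1 ∧ l.getD (k+1) 0 = 1 ∧
        XA 0 (flip2 l k 0) = 0) := by
  induction hd : l.length - i using Nat.strong_induction_on generalizing i with
  | _ d ihd =>
    subst hd
    rw [btGo]
    by_cases h : i + 1 < l.length
    · rw [dif_pos h]
      by_cases hg : l.getD i 0 = 1 ∧ l.getD (i+1) 0 = 1
      · rw [if_pos hg]
        have hcf : (flip2 l i 0).count 1 < f := by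
          have := count_flip l i h hg.1 hg.2
          have hc2 : 2 ≤ l.count 1 := by omega
          omega
        rw [IH (flip2 l i 0) hcf]
        by_cases hxf : XA 0 (flip2 l i 0) = 0
        · simp only [hxf, ne_eq, not_true_eq_false, decide_false, Bool.false_eq_true,
            if_false]
          exact iff_of_true (by trivial) ⟨i, le_refl i, h, hg.1, hg.2, hxf⟩
        · simp only [decide_eq_true_eq] at *
          rw [if_pos (by simpa using hxf)]
          rw [ihd (l.length - (i+1)) (by omega) (i+1) rfl]
          constructor
          · rintro ⟨k, hk1, hk2, hk3, hk4, hk5⟩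
            exact ⟨k, by omega, hk2, hk3, hk4, hk5⟩
          · rintro ⟨k, hk1, hk2, hk3, hk4, hk5⟩
            refine ⟨k, ?_, hk2, hk3, hk4, hk5⟩
            rcases Nat.eq_or_lt_of_le hk1 with rfl | hlt
            · exact absurd hk5 hxf
            · omega
      · rw [if_neg hg]
        rw [ihd (l.length - (i+1)) (by omega) (i+1) rfl]
        constructor
        · rintro ⟨k, hk1, hk2, hk3, hk4, hk5⟩
          exact ⟨k, by omega, hk2, hk3, hk4, hk5⟩
        · rintro ⟨k, hk1, hk2, hk3, hk4, hk5⟩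
          refine ⟨k, ?_, hk2, hk3, hk4, hk5⟩
          rcases Nat.eq_or_lt_of_le hk1 with rfl | hlt
          · exact absurd ⟨hk3, hk4⟩ hg
          · omega
    · rw [dif_neg h]
      simp only [Bool.false_eq_true, false_iff]
      rintro ⟨k, hk1, hk2, _, _, _⟩
      omega

theorem btGo_main (f : Nat) (l : List Int) (hc : l.count 1 < f) :
    btGo f l 0 = decide (XA 0 l ≠ 0) := by
  induction f generalizing l with
  | zero => omega
  | succ f ihf =>
    have hiff := btGo_loop f ihf l hc 0
    by_cases hx : XA 0 l = 0
    · have : btGo (f+1) l 0 ≠ true := by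
        intro hb
        obtain ⟨k, _, hk2, hk3, hk4, hk5⟩ := hiff.mp hb
        exact GLose l k hk2 hk3 hk4 hx hk5
      simp only [Bool.not_eq_true] at this
      rw [this, hx]
      simp
    · obtain ⟨k, hk1, hk2, hk3, hk4⟩ := GWin l hx
      rw [hiff.mpr ⟨k, Nat.zero_le k, hk1, hk2, hk3, hk4⟩]
      simp [hx]

-- ---------- B computes XA ≠ 0 ----------
theorem gStep_eq (m : Nat) (hm : 2 ≤ m) :
    (List.range m).map gr ++
      [mexL ((List.range (m-1)).map
        (fun i => ((List.range m).map gr).getD i 0 ^^^ ((List.range m).map gr).getD (m-2-i) 0))] =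
    (List.range (m+1)).map gr := by
  have harg : (List.range (m-1)).map
      (fun i => ((List.range m).map gr).getD i 0 ^^^ ((List.range m).map gr).getD (m-2-i) 0) =
      optVals m := by
    apply List.map_congr_left
    intro i hi
    have hi' := List.mem_range.mp hi
    rw [PySem.List.getD_map_range gr m i 0 (by omega),
        PySem.List.getD_map_range gr m (m-2-i) 0 (by omega)]
  rw [harg, ← gr_eq_mex m hm, List.range_succ, List.map_append]
  rfl

theorem gfold (c m : Nat) (hm : 2 ≤ m) :
    (List.range' m c).foldl
      (fun acc k =>
        acc ++ [mexL ((List.range (k-1)).map (fun i => acc.getD i 0 ^^^ acc.getD (k-2-i) 0))])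
      ((List.range m).map gr) = (List.range (m+c)).map gr := by
  induction c generalizing m with
  | zero => simp
  | succ c ih =>
    rw [List.range'_succ, List.foldl_cons, gStep_eq m hm, ih (m+1) (by omega),
        show m + 1 + c = m + (c+1) from by omega]

theorem gTable_eq (n : Nat) : gTable n = (List.range (max (n+1) 2)).map gr := by
  have e0 : gr 0 = 0 := gr_lt_two 0 (by norm_num)
  have e1 : gr 1 = 0 := gr_lt_two 1 (by norm_num)
  have h2 : [(0:Nat), 0] = (List.range 2).map gr := by
    rw [show List.range 2 = [0, 1] from rfl]
    simp [e0, e1]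
  match n with
  | 0 =>
    unfold gTable
    simp only [Nat.zero_sub, List.range'_zero, List.foldl_nil]
    rw [h2]
    rfl
  | n+1 =>
    unfold gTable
    rw [h2, show n + 1 - 1 = n from rfl, gfold n 2 (le_refl 2),
        show max (n+1+1) 2 = 2 + n from by omega]

theorem gTable_getD (n k : Nat) (h : k ≤ n) : (gTable n).getD k 0 = gr k := by
  rw [gTable_eq]
  exact PySem.List.getD_map_range gr _ k 0 (by omega)

theorem xorG_cons (r : Nat) (rs : List Nat) : xorG (r :: rs) = gr r ^^^ xorG rs := rfl

theorem xorG_append_singleton (a : List Nat) (r : Nat) :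
    xorG (a ++ [r]) = xorG a ^^^ gr r := by
  induction a with
  | nil => simp [xorG, Nat.xor_comm]
  | cons x a ih =>
    rw [List.cons_append, xorG_cons, xorG_cons, ih, Nat.xor_assoc]

theorem runsGo_xorG (l : List Int) (acc : List Nat) (cur : Nat) :
    xorG (runsGo l acc cur) = xorG acc ^^^ XA cur l := by
  induction l generalizing acc cur with
  | nil =>
    rw [XA_nil]
    by_cases hc : cur = 0
    · subst hc
      simp [runsGo, gr_lt_two 0 (by norm_num)]
    · simp [runsGo, hc, xorG_append_singleton]
  | cons v r ih =>
    by_cases hv : v = 1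
    · subst hv
      rw [show runsGo (1 :: r) acc cur = runsGo r acc (cur+1) from by simp [runsGo],
          XA_one, ih]
    · rw [XA_not_one _ _ _ hv]
      by_cases hc : cur = 0
      · subst hc
        rw [show runsGo (v :: r) acc 0 = runsGo r acc 0 from by simp [runsGo, hv],
            ih, gr_lt_two 0 (by norm_num), Nat.zero_xor]
      · rw [show runsGo (v :: r) acc cur = runsGo r (acc ++ [cur]) 0 from by
              simp [runsGo, hv, hc],
            ih, xorG_append_singleton, Nat.xor_assoc]

theorem foldl_xor_eq (G : List Nat) (rs : List Nat) (a : Nat)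
    (h : ∀ r ∈ rs, G.getD r 0 = gr r) :
    rs.foldl (fun a r => a ^^^ G.getD r 0) a = a ^^^ xorG rs := by
  induction rs generalizing a with
  | nil => simp [xorG]
  | cons r rs ih =>
    rw [List.foldl_cons, ih _ (fun x hx => h x (List.mem_cons_of_mem r hx)),
        h r List.mem_cons_self, xorG_cons, Nat.xor_assoc]

theorem solve_alt_eq (l : List Int) : solve_alt l = decide (XA 0 l ≠ 0) := by
  unfold solve_alt
  have hm := (PySem.List.le_foldl_max (runsGo l [] 0) 0).2
  have hx : (runsGo l [] 0).foldl
      (fun a r => a ^^^ (gTable ((runsGo l [] 0).foldl (fun a r => max a r) 0)).getD r 0) 0 =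
      XA 0 l := by
    rw [foldl_xor_eq _ (runsGo l [] 0) 0 (fun r hr =>
        gTable_getD _ r (hm r hr)), Nat.zero_xor, runsGo_xorG l [] 0]
    simp [xorG]
  simp only [hx]

-- ===== VERDICT (by name: the statement is the Claim_ definition above) =====
theorem solve_spec : Claim_equal_solve := by
  intro nums _
  unfold Spec_solve
  show btGo (nums.length + 1) nums 0 = solve_alt nums
  rw [solve_alt_eq, btGo_main]
  exact Nat.lt_succ_of_le List.count_le_length
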